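-- pv_equiv track=rewrite | github.com/aileentran/practice | cafeorder.py | is_first_come_first_served
-- ===== SOURCE A (Python) =====
-- def is_first_come_first_served(take_out_orders, dine_in_orders, served_orders):
--
--     # Check if we're serving orders first-come, first-served
--
--     for served in served_orders:
--         # checking if anything is queued up for both takeout and dinein
--         if len(take_out_orders) > 0:
--             first_takeout = take_out_orders[0]
--         else:
--             first_takeout = None
--
--         if len(dine_in_orders) > 0:
--             first_dinein = dine_in_orders[0]
--         else:
--             first_dinein = None
--
--         # check order of served vs queues
--         if (served == first_takeout):
--             take_out_orders.remove(first_takeout)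
--         elif (served == first_dinein):
--             dine_in_orders.remove(first_dinein)
--         else:
--             return False
--
--     # orders still unfulfilled
--     if len(take_out_orders) > 0 or len(dine_in_orders) > 0:
--         return False
--
--     return True
-- ===== SOURCE B (Python) =====
-- def is_first_come_first_served(take_out_orders, dine_in_orders, served_orders):
--     # Two index pointers advance through the queues; no list mutation, O(n).
--     i = j = 0
--     for served in served_orders:
--         if i < len(take_out_orders) and served == take_out_orders[i]:
--             i += 1
--         elif j < len(dine_in_orders) and served == dine_in_orders[j]:
--             j += 1
--         else:
--             return False
--     return i == len(take_out_orders) and j == len(dine_in_orders)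
-- ===== Notes on version B (the rewrite author's own statement) =====
-- stated objective: faster
-- what changed: Replaces repeated list.remove of the queue head (O(n) shift each, mutating the argument lists) with two index pointers advanced in one pass over served_orders, no mutation.
import Mathlib
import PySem

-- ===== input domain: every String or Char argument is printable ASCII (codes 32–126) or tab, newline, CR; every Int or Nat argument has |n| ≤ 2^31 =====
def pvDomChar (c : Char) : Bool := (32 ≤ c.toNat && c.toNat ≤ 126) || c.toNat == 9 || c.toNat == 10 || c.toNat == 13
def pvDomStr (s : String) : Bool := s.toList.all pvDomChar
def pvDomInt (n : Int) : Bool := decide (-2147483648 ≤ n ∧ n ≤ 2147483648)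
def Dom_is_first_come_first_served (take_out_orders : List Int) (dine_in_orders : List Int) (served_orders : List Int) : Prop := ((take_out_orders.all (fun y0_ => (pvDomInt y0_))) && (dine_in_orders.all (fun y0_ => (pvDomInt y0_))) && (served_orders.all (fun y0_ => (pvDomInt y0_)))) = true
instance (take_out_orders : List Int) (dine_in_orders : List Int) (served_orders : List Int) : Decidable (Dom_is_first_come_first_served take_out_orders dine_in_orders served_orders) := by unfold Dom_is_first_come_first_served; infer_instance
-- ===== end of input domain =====

-- B: two index pointers in one pass instead of repeated list.remove of the head; A mutates its first two arguments in place, B does not (equivalence is about the return value only).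


-- ===== PORT A =====
def goA_is_first_come_first_served : List Int → List Int → List Int → Bool
  | ts, ds, [] => !(decide (0 < ts.length) || decide (0 < ds.length))
  | ts, ds, s :: rest =>
    -- first_takeout / first_dinein: the head if the queue is nonempty, else None;
    -- 'served == None' is False for ints, so the comparison is 'head? = some s'.
    if ts.head? = some s then
      -- take_out_orders.remove(first_takeout): first occurrence of the head = the head
      -- (the value is present, so Python's ValueError branch of remove is unreachable)
      goA_is_first_come_first_served ((PySem.List.remove? ts s).getD ts) ds rest
    else if ds.head? = some s then
      goA_is_first_come_first_served ts ((PySem.List.remove? ds s).getD ds) rest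
    else false

-- NOTE: Python A mutates its first two arguments in place (remove); the equivalence
-- proved here is about the RETURN value only.
def is_first_come_first_served (take_out_orders : List Int) (dine_in_orders : List Int) (served_orders : List Int) : Bool :=
  goA_is_first_come_first_served take_out_orders dine_in_orders served_orders

-- ===== PORT B =====
def goB_is_first_come_first_served (ts ds : List Int) : List Int → Nat → Nat → Bool
  | [], i, j => i == ts.length && j == ds.length
  | s :: rest, i, j =>
    if ts[i]? = some s then goB_is_first_come_first_served ts ds rest (i+1) j
    else if ds[j]? = some s then goB_is_first_come_first_served ts ds rest i (j+1)
    else false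

def is_first_come_first_served_alt (take_out_orders : List Int) (dine_in_orders : List Int) (served_orders : List Int) : Bool :=
  goB_is_first_come_first_served take_out_orders dine_in_orders served_orders 0 0

-- ===== PRECONDITION & SPEC =====
def Spec_is_first_come_first_served (take_out_orders : List Int) (dine_in_orders : List Int) (served_orders : List Int) (out : Bool) : Prop := out = is_first_come_first_served_alt take_out_orders dine_in_orders served_orders
instance (take_out_orders : List Int) (dine_in_orders : List Int) (served_orders : List Int) (out : Bool) : Decidable (Spec_is_first_come_first_served take_out_orders dine_in_orders served_orders out) := by unfold Spec_is_first_come_first_served; infer_instance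

-- ===== CLAIM (what is proved, stated in full; the proofs are below) =====
def Claim_equal_is_first_come_first_served : Prop := ∀ (take_out_orders : List Int) (dine_in_orders : List Int) (served_orders : List Int), Dom_is_first_come_first_served take_out_orders dine_in_orders served_orders → Spec_is_first_come_first_served take_out_orders dine_in_orders served_orders (is_first_come_first_served take_out_orders dine_in_orders served_orders)

-- ===== LEMMAS AND PROOFS =====


lemma goAB_is_first_come_first_served (rest : List Int) (ts ds : List Int) (i j : Nat)
    (hi : i ≤ ts.length) (hj : j ≤ ds.length) :
    goA_is_first_come_first_served (ts.drop i) (ds.drop j) rest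
      = goB_is_first_come_first_served ts ds rest i j := by
  induction rest generalizing i j with
  | nil =>
    simp only [goA_is_first_come_first_served, goB_is_first_come_first_served,
      List.length_drop]
    by_cases h1 : i = ts.length <;> by_cases h2 : j = ds.length
    · simp [h1, h2]
    · have : 0 < ds.length - j := by omega
      simp [h1, h2, this]
    · have : 0 < ts.length - i := by omega
      simp [h1, h2, this]
    · have : 0 < ts.length - i := by omega
      simp [h1, this]
  | cons s rest ih =>
    simp only [goA_is_first_come_first_served, goB_is_first_come_first_served,
      List.head?_drop]
    by_cases h1 : ts[i]? = some s
    · have hlt : i < ts.length := by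
        by_contra h; simp [List.getElem?_eq_none (by omega : ts.length ≤ i)] at h1
      have hdrop : ts.drop i = s :: ts.drop (i+1) := by
        rw [List.drop_eq_getElem_cons hlt]
        have : ts[i] = s := by simpa [List.getElem?_eq_getElem hlt] using h1
        rw [this]
      rw [if_pos h1, hdrop, PySem.List.remove?_cons_self]
      simpa [hdrop, h1] using ih (i+1) j (by omega) hj
    · rw [if_neg h1]
      by_cases h2 : ds[j]? = some s
      · have hlt : j < ds.length := by
          by_contra h; simp [List.getElem?_eq_none (by omega : ds.length ≤ j)] at h2
        have hdrop : ds.drop j = s :: ds.drop (j+1) := by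
          rw [List.drop_eq_getElem_cons hlt]
          have : ds[j] = s := by simpa [List.getElem?_eq_getElem hlt] using h2
          rw [this]
        rw [if_pos h2, hdrop, PySem.List.remove?_cons_self]
        simpa [hdrop, h1, h2] using ih i (j+1) hi (by omega)
      · rw [if_neg h2]
        simp [h1, h2]

-- ===== VERDICT (by name: the statement is the Claim_ definition above) =====
theorem is_first_come_first_served_spec : Claim_equal_is_first_come_first_served := by
  intro ts ds s _
  unfold Spec_is_first_come_first_served is_first_come_first_served is_first_come_first_served_alt
  simpa using goAB_is_first_come_first_served s ts ds 0 0 (Nat.zero_le _) (Nat.zero_le _)
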